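-- pv_equiv track=rewrite | github.com/dengguojie/vue-element-admin | auto_schedule/python/lang/dynamic/schedule/reduce_schedule.py | _find_last_reduce_axis
-- ===== SOURCE A (Python) =====
-- def _find_last_reduce_axis(shape_before_reduce, reduce_axis_index):
--     """
--     :param shape_before_reduce:
--     :param reduce_axis_index:
--     :return:
--     """
--     # shape_before_reduce:(ak+1,rk,..,r2,a2,r1,a1) or (ak,rk,..,r2,a1,r1),
--     # find r1 position, r1 may contain continues axis
--     r1_end_index = None
--     for i in range(len(shape_before_reduce) - 1, -1, -1):
--         if i in reduce_axis_index:
--             r1_end_index = i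
--             break
--     r1_start_index = r1_end_index
--     if r1_end_index is None:
--         return r1_start_index, r1_end_index
--     for i in range(r1_end_index, -1, -1):
--         if i not in reduce_axis_index:
--             r1_start_index = i + 1
--             break
--         if i == 0:
--             r1_start_index = i
--
--     return r1_start_index, r1_end_index
-- ===== SOURCE B (Python) =====
-- def _find_last_reduce_axis(shape_before_reduce, reduce_axis_index):
--     idx = set(reduce_axis_index)
--     present = [i for i in range(len(shape_before_reduce)) if i in idx]
--     if not present:
--         return None, None
--     rev = present[::-1]
--     r1_start_index = rev[0]
--     for prev in rev[1:]:
--         if prev == r1_start_index - 1: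
--             r1_start_index = prev
--         else:
--             break
--     return r1_start_index, rev[0]
-- ===== Notes on version B (the rewrite author's own statement) =====
-- stated objective: faster
-- what changed: B replaces A's two downward index scans with linear-list membership tests by one set build plus one ascending filtered 'present' list, then walks the reversed present list while entries stay consecutive.
import Mathlib
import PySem

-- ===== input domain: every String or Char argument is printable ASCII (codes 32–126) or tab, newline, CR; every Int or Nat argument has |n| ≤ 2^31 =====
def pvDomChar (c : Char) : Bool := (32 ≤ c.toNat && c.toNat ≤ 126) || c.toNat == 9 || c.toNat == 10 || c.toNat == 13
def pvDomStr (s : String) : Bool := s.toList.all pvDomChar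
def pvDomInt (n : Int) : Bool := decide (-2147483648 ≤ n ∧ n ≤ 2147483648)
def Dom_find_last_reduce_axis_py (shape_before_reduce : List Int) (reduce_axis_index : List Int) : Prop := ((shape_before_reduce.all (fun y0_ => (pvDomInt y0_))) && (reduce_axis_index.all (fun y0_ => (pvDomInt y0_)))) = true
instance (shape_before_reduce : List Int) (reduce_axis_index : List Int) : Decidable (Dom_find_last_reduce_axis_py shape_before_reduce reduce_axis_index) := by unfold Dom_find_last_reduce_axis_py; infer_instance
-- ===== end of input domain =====

-- B replaces A's downward index scans (list membership inside loops) by a set build, an ascending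
-- filtered list of present indices, and a walk of its reversal while entries stay consecutive.

-- ===== PORT A =====
-- first loop: 'for i in range(len(shape)-1, -1, -1): if i in reduce_axis_index: r1_end_index = i; break'
def pvFindEnd (reduce_axis_index : List Int) : List Int → Option Int
  | [] => none
  | i :: rest => if i ∈ reduce_axis_index then some i else pvFindEnd reduce_axis_index rest

-- second loop: 'for i in range(r1_end_index, -1, -1): …' carrying r1_start_index
def pvStartLoop (reduce_axis_index : List Int) (start : Int) : List Int → Int
  | [] => start
  | i :: rest =>
      if i ∉ reduce_axis_index then i + 1
      else if i = 0 then pvStartLoop reduce_axis_index i rest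
      else pvStartLoop reduce_axis_index start rest

def find_last_reduce_axis_py (shape_before_reduce : List Int) (reduce_axis_index : List Int) : Option Int × Option Int :=
  match pvFindEnd reduce_axis_index (PySem.List.pyRange ((shape_before_reduce.length : Int) - 1) (-1) (-1)) with
  | none => (none, none)
  | some e =>
      (some (pvStartLoop reduce_axis_index e (PySem.List.pyRange e (-1) (-1))), some e)

-- ===== PORT B =====
-- 'for prev in rev[1:]: if prev == r1_start_index - 1: r1_start_index = prev else: break'
def pvAltChain (start : Int) : List Int → Int
  | [] => start
  | prev :: rest => if prev = start - 1 then pvAltChain prev rest else start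

def find_last_reduce_axis_py_alt (shape_before_reduce : List Int) (reduce_axis_index : List Int) : Option Int × Option Int :=
  let idx := PySem.Set.ofList reduce_axis_index
  let present := (PySem.List.pyRange 0 (shape_before_reduce.length : Int) 1).filter (fun i => decide (i ∈ idx))
  match present.reverse with            -- rev = present[::-1]  (slice [::-1] is reverse)
  | [] => (none, none)
  | e :: rest => (some (pvAltChain e rest), some e)

-- ===== PRECONDITION & SPEC =====
def Spec_find_last_reduce_axis_py (shape_before_reduce : List Int) (reduce_axis_index : List Int) (out : Option Int × Option Int) : Prop := out = find_last_reduce_axis_py_alt shape_before_reduce reduce_axis_index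
instance (shape_before_reduce : List Int) (reduce_axis_index : List Int) (out : Option Int × Option Int) : Decidable (Spec_find_last_reduce_axis_py shape_before_reduce reduce_axis_index out) := by unfold Spec_find_last_reduce_axis_py; infer_instance

-- ===== CLAIM (what is proved, stated in full; the proofs are below) =====
def Claim_equal_find_last_reduce_axis_py : Prop := ∀ (shape_before_reduce : List Int) (reduce_axis_index : List Int), Dom_find_last_reduce_axis_py shape_before_reduce reduce_axis_index → Spec_find_last_reduce_axis_py shape_before_reduce reduce_axis_index (find_last_reduce_axis_py shape_before_reduce reduce_axis_index)

-- ===== LEMMAS AND PROOFS =====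

-- abstract value of both "find start" loops, by downward recursion on the index
def pvG (reduce_axis_index : List Int) : Nat → Int
  | 0 => if (0 : Int) ∈ reduce_axis_index then 0 else 1
  | m + 1 => if ((m + 1 : Nat) : Int) ∈ reduce_axis_index then pvG reduce_axis_index m else (m : Int) + 2

theorem pvFindEnd_eq_head_filter (r l : List Int) :
    pvFindEnd r l = (l.filter (fun i => decide (i ∈ r))).head? := by
  induction l with
  | nil => rfl
  | cons a t ih => by_cases h : a ∈ r <;> simp [pvFindEnd, h, ih]

theorem pvStartLoop_eq_pvG (r : List Int) (m : Nat) (st : Int) :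
    pvStartLoop r st (PySem.List.pyRange (m : Int) (-1) (-1)) = pvG r m := by
  induction m generalizing st with
  | zero =>
      rw [PySem.List.pyRange_neg_one_cons (by norm_num)]
      rw [show ((0:Nat):Int) - 1 = -1 by norm_num, PySem.List.pyRange_neg_one_eq_nil (by norm_num)]
      by_cases h : (0 : Int) ∈ r <;> simp [pvStartLoop, pvG, h]
  | succ m ih =>
      rw [PySem.List.pyRange_neg_one_cons (by push_cast; omega)]
      rw [show ((m + 1 : Nat) : Int) - 1 = (m : Int) by push_cast; ring]
      simp only [pvStartLoop, pvG]
      by_cases h : ((m + 1 : Nat) : Int) ∈ r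
      · rw [if_neg (not_not_intro h), if_neg (by push_cast; omega), ih, if_pos h]
      · rw [if_pos h, if_neg h]; push_cast; ring

theorem pvG_of_not_mem (r : List Int) (m : Nat) (h : ((m : Nat) : Int) ∉ r) : pvG r m = (m : Int) + 1 := by
  cases m with
  | zero => simp [pvG, show (0 : Int) ∉ r by simpa using h]
  | succ k => simp only [pvG]; rw [if_neg h]; push_cast; ring

theorem pvAltChain_eq_pvG (r : List Int) (m : Nat) (hm : ((m : Nat) : Int) ∈ r) :
    pvAltChain (m : Int) (((PySem.List.pyRange 0 (m : Int) 1).filter (fun i => decide (i ∈ r))).reverse) = pvG r m := by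
  induction m with
  | zero =>
      rw [PySem.List.pyRange_one_eq_nil (by norm_num)]
      simp [pvAltChain, pvG, show (0 : Int) ∈ r by simpa using hm]
  | succ m ih =>
      rw [show ((m + 1 : Nat) : Int) = (m : Int) + 1 by push_cast; ring,
        PySem.List.pyRange_one_succ_right (by positivity)]
      rw [List.filter_append, List.reverse_append]
      by_cases h : ((m : Nat) : Int) ∈ r
      · have hgg : pvG r (m + 1) = pvG r m := by simp only [pvG]; rw [if_pos hm]
        rw [hgg]
        simp only [List.filter_cons, List.filter_nil]
        rw [if_pos (by simpa using h)]
        simp only [List.reverse_cons, List.reverse_nil, List.nil_append, List.cons_append]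
        rw [show ((m : Int) + 1) = ((m : Nat) : Int) + 1 by ring]
        simp only [pvAltChain, add_sub_cancel_right]
        simpa using ih h
      · have hg : pvG r (m + 1) = (m : Int) + 1 := by
          simp only [pvG]; rw [if_pos hm, pvG_of_not_mem r m h]
        rw [hg]
        simp only [List.filter_cons, List.filter_nil]
        rw [if_neg (by simpa using h)]
        simp only [List.reverse_nil, List.nil_append]
        -- every remaining element is < m, so the chain breaks immediately
        cases hrev : ((PySem.List.pyRange 0 (m : Int) 1).filter (fun i => decide (i ∈ r))).reverse with
        | nil => simp [pvAltChain]
        | cons x t =>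
            have hx : x ∈ ((PySem.List.pyRange 0 (m : Int) 1).filter (fun i => decide (i ∈ r))).reverse := by
              rw [hrev]; exact List.mem_cons_self
            have hx' : x < (m : Int) := by
              rw [List.mem_reverse, List.mem_filter] at hx
              exact ((PySem.List.mem_pyRange_one).1 hx.1).2
            simp only [pvAltChain]
            rw [if_neg (show ¬ x = (m : Int) + 1 - 1 by omega)]

theorem pv_main (shape_before_reduce reduce_axis_index : List Int) :
    find_last_reduce_axis_py shape_before_reduce reduce_axis_index
      = find_last_reduce_axis_py_alt shape_before_reduce reduce_axis_index := by
  set r := reduce_axis_index with hr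
  set n : Int := (shape_before_reduce.length : Int) with hn
  have hn0 : 0 ≤ n := by simp [hn]
  set p : Int → Bool := fun i => decide (i ∈ r) with hp
  set present : List Int := (PySem.List.pyRange 0 n 1).filter p with hpres
  -- A's first loop scans the ascending range reversed
  have hdesc : PySem.List.pyRange (n - 1) (-1) (-1) = (PySem.List.pyRange 0 n 1).reverse := by
    rw [PySem.List.pyRange_neg_one_eq_reverse]; norm_num
  have hA : pvFindEnd r (PySem.List.pyRange (n - 1) (-1) (-1)) = present.reverse.head? := by
    rw [pvFindEnd_eq_head_filter, hdesc, List.filter_reverse]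
  -- B's membership test in set(r) is membership in r
  have hmemset : (fun i => decide (i ∈ PySem.Set.ofList r)) = p := by
    funext i; simp [hp, PySem.Set.mem_ofList]
  unfold find_last_reduce_axis_py find_last_reduce_axis_py_alt
  simp only [← hn, hmemset, ← hpres, hA]
  cases hrev : present.reverse with
  | nil => simp
  | cons e rest =>
      simp only [List.head?_cons]
      -- facts about e and rest
      have hpresrec : present = rest.reverse ++ [e] := by
        have := congrArg List.reverse hrev
        simpa using this
      have hepres : e ∈ present := by rw [hpresrec]; simp
      have heR : e ∈ r := by
        have := (List.mem_filter.1 (hpres ▸ hepres)).2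
        simpa [hp] using this
      have herange : 0 ≤ e ∧ e < n := by
        have := (List.mem_filter.1 (hpres ▸ hepres)).1
        exact PySem.List.mem_pyRange_one.1 this
      have hpair : present.Pairwise (· < ·) := by
        rw [hpres]; exact List.Pairwise.filter _ (PySem.List.pairwise_lt_pyRange_one 0 n)
      have hlt : ∀ x ∈ rest, x < e := by
        intro x hx
        have := hpresrec ▸ hpair
        rw [List.pairwise_append] at this
        exact this.2.2 x (by simpa using hx) e (by simp)
      -- the tail above e contributes nothing: present splits at e
      have hsplit : present = ((PySem.List.pyRange 0 e 1).filter p) ++ [e] := by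
        have h1 : PySem.List.pyRange 0 n 1 = PySem.List.pyRange 0 (e + 1) 1 ++ PySem.List.pyRange (e + 1) n 1 := by
          exact PySem.List.pyRange_one_append 0 (e + 1) n (by omega) (by omega)
        have h2 : PySem.List.pyRange 0 (e + 1) 1 = PySem.List.pyRange 0 e 1 ++ [e] := by
          exact PySem.List.pyRange_one_succ_right (by omega)
        have hTnil : (PySem.List.pyRange (e + 1) n 1).filter p = [] := by
          rw [List.eq_nil_iff_forall_not_mem]
          intro x hx
          have hx1 := (List.mem_filter.1 hx).1
          have hx2 : x ∈ present := by
            rw [hpres, h1, List.filter_append]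
            exact List.mem_append_right _ hx
          have hgt : e < x := (PySem.List.mem_pyRange_one.1 hx1).1
          rw [hpresrec] at hx2
          rcases List.mem_append.1 hx2 with h | h
          · exact absurd (hlt x (by simpa using h)) (by omega)
          · simp at h; omega
        rw [hpres, h1, h2, List.filter_append, List.filter_append, hTnil, List.append_nil,
          List.filter_cons, if_pos (by simpa [hp] using heR), List.filter_nil]
      have hrest : rest = ((PySem.List.pyRange 0 e 1).filter p).reverse := by
        have := congrArg List.reverse hsplit
        rw [hrev] at this
        simpa using this
      -- both loops compute pvG at e.toNat
      have hecast : ((e.toNat : Nat) : Int) = e := Int.toNat_of_nonneg herange.1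
      have h2 := pvAltChain_eq_pvG r e.toNat (by rw [hecast]; exact heR)
      rw [hecast] at h2
      have h3 := pvStartLoop_eq_pvG r e.toNat e
      rw [hecast] at h3
      rw [h3, hrest, h2]

-- ===== VERDICT (by name: the statement is the Claim_ definition above) =====
theorem find_last_reduce_axis_py_spec : Claim_equal_find_last_reduce_axis_py := by
  intro shape_before_reduce reduce_axis_index _
  unfold Spec_find_last_reduce_axis_py
  exact pv_main shape_before_reduce reduce_axis_index
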